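-- pv_equiv track=rewrite | github.com/nkrang/Algorithm-Study | 202109/P-72412/순위검색_시간초과.py | solution
-- ===== SOURCE A (Python) =====
-- def solution(info, query):
--     answer = []
--
--     for x in query:
--         cnt = 0
--         q = []
--         for t in list(map(str,x.split())):
--             if t != "and":
--                 q.append(t)
--         for y in info:
--             one = list(map(str, y.split()))
--             if one[-1] > q[-1]:
--                 for i in range(4):
--                     if one[i] != q[i] and q[i] != "-":
--                         break
--                 else:
--                     cnt += 1
--         answer.append(cnt)
--
--     return answer
-- ===== SOURCE B (Python) =====
-- def solution(info, query):
--     # Precompute: map every wildcard-combination key (tuple of 4 attrs with '-' substitutions)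
--     # to the list of scores of the rows it covers; each query is then one dict lookup.
--     if not query:
--         return []
--     buckets = {}
--     for y in info:
--         one = y.split()
--         attrs = one[:4]
--         score = one[-1]
--         keys = [()]
--         for a in attrs:
--             opts = ("-",) if a == "-" else (a, "-")
--             keys = [k + (o,) for k in keys for o in opts]
--         for k in keys:
--             buckets.setdefault(k, []).append(score)
--     answer = []
--     for x in query:
--         q = [t for t in x.split() if t != "and"]
--         bucket = buckets.get(tuple(q[:4]), [])
--         answer.append(sum(1 for s in bucket if s > q[-1]))
--     return answer
-- ===== Notes on version B (the rewrite author's own statement) =====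
-- stated objective: faster
-- what changed: Instead of re-scanning all info rows per query with a 4-field break loop, B precomputes one dict mapping each of a row's 16 wildcard-combination keys to the list of its scores, so each query is a single dict lookup plus a scan of only the matching bucket.
import Mathlib
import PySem

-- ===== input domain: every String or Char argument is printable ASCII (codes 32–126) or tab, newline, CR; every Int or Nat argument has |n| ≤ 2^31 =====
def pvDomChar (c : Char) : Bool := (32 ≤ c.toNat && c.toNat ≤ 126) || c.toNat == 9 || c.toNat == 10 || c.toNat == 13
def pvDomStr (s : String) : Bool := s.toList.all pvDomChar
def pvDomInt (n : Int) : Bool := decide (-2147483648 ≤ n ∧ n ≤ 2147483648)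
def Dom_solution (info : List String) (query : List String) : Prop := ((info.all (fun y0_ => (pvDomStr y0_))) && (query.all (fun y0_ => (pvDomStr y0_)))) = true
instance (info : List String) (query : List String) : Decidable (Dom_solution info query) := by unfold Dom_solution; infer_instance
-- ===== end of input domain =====

-- B replaces A's per-query scan of every info row by a precomputed dict from the (up to 16) wildcard-combination
-- keys of each row to that row's scores; each query becomes one dict lookup plus a scan of its bucket.


-- ===== PORT A =====
-- 'q = []; for t in x.split(): if t != "and": q.append(t)' — A's explicit append loop
def aStrip (x : String) : List String :=
  (PySem.Str.split₀ x).foldl (fun q t => if t ≠ "and" then q ++ [t] else q) []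

-- A's 'for i in range(4): … break / else:' scan (true = the else branch is reached)
def aCheck (one q : List String) (i : Nat) : Bool :=
  if i < 4 then
    if PySem.List.pyGetD one (i : Int) "" ≠ PySem.List.pyGetD q (i : Int) "" ∧
       PySem.List.pyGetD q (i : Int) "" ≠ "-" then false
    else aCheck one q (i + 1)
  else true
termination_by 4 - i

def solution (info : List String) (query : List String) : List Int :=
  query.foldl (fun answer x =>
    let q := aStrip x
    let cnt := info.foldl (fun cnt y =>
      let one := PySem.Str.split₀ y
      if PySem.List.pyGetD q (-1) "" < PySem.List.pyGetD one (-1) "" then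
        if aCheck one q 0 then cnt + 1 else cnt
      else cnt) (0 : Int)
    answer ++ [cnt]) []

-- ===== PORT B =====
def bOpts (a : String) : List String := if a = "-" then ["-"] else [a, "-"]

-- 'keys = [k + (o,) for k in keys for o in opts]' over the row's first four tokens
def bKeys (attrs : List String) : List (List String) :=
  attrs.foldl (fun keys a => keys.flatMap (fun k => (bOpts a).map (fun o => k ++ [o]))) [[]]

-- 'buckets.setdefault(k, []).append(score)' for every wildcard key of every row
def bBuckets (info : List String) : PySem.Dict (List String) (List String) :=
  info.foldl (fun d y =>
    let one := PySem.Str.split₀ y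
    (bKeys (one.take 4)).foldl
      (fun d k => d.modify k [] (· ++ [PySem.List.pyGetD one (-1) ""])) d)
    PySem.Dict.empty

def solution_alt (info : List String) (query : List String) : List Int :=
  if query = [] then []
  else
    let buckets := bBuckets info
    query.map (fun x =>
      let q := (PySem.Str.split₀ x).filter (fun t => t ≠ "and")
      let bucket := buckets.getD (PySem.List.slice q none (some 4)) []
      -- 'sum(1 for s in bucket if s > q[-1])'; q[-1] is only reached when the bucket is nonempty
      ((bucket.countP (fun s => decide (PySem.List.pyGetD q (-1) "" < s))) : Int))

-- ===== PRECONDITION & SPEC =====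
-- Pre_solution admits exactly the inputs on which A returns (A raises IndexError on all others):
-- every info row must be nonempty, every and-stripped query nonempty (when info is nonempty), and
-- whenever a row's last token exceeds a query's last token, A's 4-position scan must hit a mismatch
-- before running off the end of either token list.
def RowOK (one q : List String) : Prop :=
  one ≠ [] ∧
  ((q.getD (q.length - 1) "").toList < (one.getD (one.length - 1) "").toList →
    ∀ i : Nat, i < 4 →
      (∀ j : Nat, j < i → (one.getD j "" = q.getD j "" ∨ q.getD j "" = "-")) →
      i < one.length ∧ i < q.length)

def preQ (x : String) : List String := (PySem.Str.split₀ x).filter (fun t => t ≠ "and")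

def Pre_solution (info : List String) (query : List String) : Prop :=
  ∀ x ∈ query, info = [] ∨ (preQ x ≠ [] ∧ ∀ y ∈ info, RowOK (PySem.Str.split₀ y) (preQ x))

instance (info : List String) (query : List String) : Decidable (Pre_solution info query) := by
  unfold Pre_solution RowOK preQ; infer_instance

def pvWitness_solution : List String × List String :=
  (["java backend junior pizza 150", "python frontend senior chicken 210"],
   ["java and backend and junior and pizza 100", "- and - and - and chicken 100"])

def Spec_solution (info : List String) (query : List String) (out : List Int) : Prop := out = solution_alt info query
instance (info : List String) (query : List String) (out : List Int) : Decidable (Spec_solution info query out) := by unfold Spec_solution; infer_instance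

-- ===== CLAIM (what is proved, stated in full; the proofs are below) =====
def Claim_equal_solution : Prop := ∀ (info : List String) (query : List String), Dom_solution info query → Pre_solution info query → Spec_solution info query (solution info query)

-- ===== LEMMAS AND PROOFS =====

-- Python's xs[-1] on a (possibly empty) list, with default
lemma pyGetD_neg_one {α : Type} (xs : List α) (d : α) :
    PySem.List.pyGetD xs (-1) d = xs.getD (xs.length - 1) d := by
  cases xs with
  | nil => simp [PySem.List.pyGetD, PySem.List.pyGet?, PySem.List.pyIdx?]
  | cons a t =>
    have h1 : (-(((a :: t).length : Int))) ≤ -1 := by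
      have : (1:Int) ≤ ((a :: t).length : Int) := by exact_mod_cast Nat.succ_le_of_lt (by simp)
      omega
    have h2 : ¬ (0 : Int) ≤ -1 := by omega
    simp only [PySem.List.pyGetD, PySem.List.pyGet?, PySem.List.pyIdx?, if_neg h2, if_pos h1]
    have h3 : (- -(1:Int)).toNat = 1 := by norm_num
    rw [h3]
    have h : (a :: t).length - 1 < (a :: t).length := by simp
    simp

lemma aStrip_eq (x : String) : aStrip x = preQ x := by
  unfold aStrip preQ
  rw [PySem.List.foldl_append_ite_eq_filter (fun t => t ≠ "and")]
  simp

def posOK (one q : List String) (j : Nat) : Prop :=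
  one.getD j "" = q.getD j "" ∨ q.getD j "" = "-"

lemma aCheck_iff_aux (one q : List String) :
    ∀ n i, 4 - i ≤ n → (aCheck one q i = true ↔ ∀ j, i ≤ j → j < 4 → posOK one q j) := by
  intro n
  induction n with
  | zero =>
    intro i h
    have h4 : ¬ i < 4 := by omega
    rw [aCheck, if_neg h4]
    simp only [true_iff]
    intro j hj hj4; omega
  | succ m ih =>
    intro i h
    by_cases h4 : i < 4
    · rw [aCheck, if_pos h4]
      by_cases hb : PySem.List.pyGetD one (i : Int) "" ≠ PySem.List.pyGetD q (i : Int) "" ∧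
          PySem.List.pyGetD q (i : Int) "" ≠ "-"
      · rw [if_pos hb]
        refine iff_of_false (by simp) ?_
        intro hall
        have := hall i le_rfl h4
        unfold posOK at this
        simp only [PySem.List.pyGetD_natCast] at hb
        tauto
      · rw [if_neg hb]
        rw [ih (i+1) (by omega)]
        constructor
        · intro hrest j hij hj4
          rcases Nat.lt_or_ge i j with hlt | hge
          · exact hrest j hlt hj4
          · have : j = i := by omega
            subst this
            unfold posOK
            simp only [PySem.List.pyGetD_natCast] at hb
            tauto
        · intro hall j hij hj4; exact hall j (by omega) hj4
    · rw [aCheck, if_neg h4]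
      simp only [true_iff]
      intro j hj hj4; omega

lemma aCheck_iff (one q : List String) :
    aCheck one q 0 = true ↔ ∀ j, j < 4 → posOK one q j := by
  rw [aCheck_iff_aux one q 4 0 (by omega)]
  exact ⟨fun h j hj => h j (Nat.zero_le _) hj, fun h j _ hj => h j hj⟩

lemma mem_bOpts (o a : String) : o ∈ bOpts a ↔ (o = a ∨ o = "-") := by
  unfold bOpts
  by_cases h : a = "-" <;> simp [h]

lemma nodup_bOpts (a : String) : (bOpts a).Nodup := by
  unfold bOpts
  by_cases h : a = "-" <;> simp [h]

lemma bKeys_snoc (as : List String) (a : String) :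
    bKeys (as ++ [a]) = (bKeys as).flatMap (fun k => (bOpts a).map (fun o => k ++ [o])) := by
  unfold bKeys
  rw [List.foldl_append]
  rfl

lemma nodup_bKeys (attrs : List String) : (bKeys attrs).Nodup := by
  induction attrs using List.reverseRecOn with
  | nil => simp [bKeys]
  | append_singleton as a ih =>
    rw [bKeys_snoc, List.nodup_flatMap]
    refine ⟨fun k _ => (nodup_bOpts a).map (fun o1 o2 h => by simpa using List.append_cancel_left h), ?_⟩
    refine ih.imp ?_
    intro k1 k2 hne x hx1 hx2
    simp only [List.mem_map] at hx1 hx2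
    obtain ⟨o1, _, rfl⟩ := hx1
    obtain ⟨o2, _, h2⟩ := hx2
    have : k2 = k1 := by
      have := congrArg List.dropLast h2
      simpa [List.dropLast_concat] using this
    exact hne this.symm

lemma forall₂_snoc (R : String → String → Prop) (key as : List String) (a : String) :
    List.Forall₂ R key (as ++ [a]) ↔ ∃ k o, key = k ++ [o] ∧ List.Forall₂ R k as ∧ R o a := by
  rw [← List.forall₂_reverse_iff]
  simp only [List.reverse_append, List.reverse_singleton, List.singleton_append]
  rw [List.forall₂_cons_right_iff]
  constructor
  · rintro ⟨o, u', h1, h2, hrev⟩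
    refine ⟨u'.reverse, o, ?_, ?_, h1⟩
    · rw [← key.reverse_reverse, hrev]; simp
    · rw [← List.forall₂_reverse_iff]; simpa using h2
  · rintro ⟨k, o, rfl, h2, h1⟩
    exact ⟨o, k.reverse, h1, List.forall₂_reverse_iff.2 h2, by simp⟩

lemma mem_bKeys (key attrs : List String) :
    key ∈ bKeys attrs ↔ List.Forall₂ (fun o a => o = a ∨ o = "-") key attrs := by
  induction attrs using List.reverseRecOn generalizing key with
  | nil => simp [bKeys]
  | append_singleton as a ih =>
    rw [bKeys_snoc, forall₂_snoc]
    simp only [List.mem_flatMap, List.mem_map]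
    constructor
    · rintro ⟨k, hk, o, ho, rfl⟩
      exact ⟨k, o, rfl, (ih k).1 hk, (mem_bOpts o a).1 ho⟩
    · rintro ⟨k, o, rfl, h2, h1⟩
      exact ⟨k, (ih k).2 h2, o, (mem_bOpts o a).2 h1, rfl⟩

lemma filter_beq_of_nodup (ks : List (List String)) (key : List String) (h : ks.Nodup) :
    ks.filter (fun k => k == key) = if key ∈ ks then [key] else [] := by
  induction ks with
  | nil => simp
  | cons k t ih =>
    rw [List.nodup_cons] at h
    rw [List.filter_cons, ih h.2]
    by_cases hk : k = key
    · subst hk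
      simp [h.1]
    · have hne : key ≠ k := fun h3 => hk h3.symm
      simp [hk, hne]

lemma bucketRow (ks : List (List String)) (key : List String) (hk : ks.Nodup)
    (d : PySem.Dict (List String) (List String)) (s : String) :
    (ks.foldl (fun d k => d.modify k [] (· ++ [s])) d).getD key [] =
      d.getD key [] ++ (if key ∈ ks then [s] else []) := by
  have h1 : ks.foldl (fun d k => d.modify k [] (· ++ [s])) d =
      (ks.map (fun k => (k, s))).foldl (fun d p => d.modify p.1 [] (· ++ [p.2])) d := by
    rw [List.foldl_map]
  rw [h1, PySem.Dict.getD_foldl_modify_append]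
  congr 1
  rw [List.filter_map]
  have : ((fun p : List String × String => p.1 == key) ∘ fun k => (k, s)) = fun k => k == key := rfl
  rw [this, filter_beq_of_nodup ks key hk]
  by_cases hm : key ∈ ks <;> simp [hm]

lemma getD_bBuckets (info : List String) (key : List String) :
    (bBuckets info).getD key [] =
      (info.filter (fun y => decide (key ∈ bKeys ((PySem.Str.split₀ y).take 4)))).map
        (fun y => PySem.List.pyGetD (PySem.Str.split₀ y) (-1) "") := by
  have main : ∀ (l : List String) (d : PySem.Dict (List String) (List String)),
      (l.foldl (fun d y =>
        (bKeys ((PySem.Str.split₀ y).take 4)).foldl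
          (fun d k => d.modify k [] (· ++ [PySem.List.pyGetD (PySem.Str.split₀ y) (-1) ""])) d) d).getD key [] =
      d.getD key [] ++
        (l.filter (fun y => decide (key ∈ bKeys ((PySem.Str.split₀ y).take 4)))).map
          (fun y => PySem.List.pyGetD (PySem.Str.split₀ y) (-1) "") := by
    intro l
    induction l with
    | nil => simp
    | cons y t ih =>
      intro d
      rw [List.foldl_cons, ih, bucketRow _ _ (nodup_bKeys _), List.filter_cons]
      by_cases hm : key ∈ bKeys ((PySem.Str.split₀ y).take 4) <;> simp [hm]
  have := main info PySem.Dict.empty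
  unfold bBuckets
  simp only at this ⊢
  rw [this]
  simp [PySem.Dict.getD, PySem.Dict.empty, PySem.Dict.get?]

-- the two per-row tests agree on every row Pre_ admits
lemma aCheck_mem_bKeys (one q : List String) (hrow : RowOK one q)
    (hlt : (q.getD (q.length - 1) "").toList < (one.getD (one.length - 1) "").toList) :
    (∀ j, j < 4 → posOK one q j) ↔ q.take 4 ∈ bKeys (one.take 4) := by
  rw [mem_bKeys, List.forall₂_iff_get]
  constructor
  · intro hall
    have hbound : ∀ i, i ≤ 4 → i ≤ one.length ∧ i ≤ q.length := by
      intro i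
      induction i with
      | zero => intro _; exact ⟨Nat.zero_le _, Nat.zero_le _⟩
      | succ m ihm =>
        intro hm4
        have h1 := hrow.2 hlt m (by omega) (fun j hj => hall j (by omega))
        omega
    have h4 := hbound 4 le_rfl
    have hq : (List.take 4 q).length = 4 := by rw [List.length_take]; omega
    have ho : (List.take 4 one).length = 4 := by rw [List.length_take]; omega
    refine ⟨by omega, ?_⟩
    intro i h1 h2
    have hi4 : i < 4 := by omega
    have hiq : i < q.length := by omega
    have hio : i < one.length := by omega
    have := hall i hi4
    unfold posOK at this
    rw [List.getD_eq_getElem _ _ hio, List.getD_eq_getElem _ _ hiq] at this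
    simp only [List.get_eq_getElem, List.getElem_take]
    tauto
  · rintro ⟨hlen, hget⟩
    intro j hj4
    by_cases hjq : j < q.length
    · have hlen' : min 4 q.length = min 4 one.length := by
        have h2 := hlen
        rw [List.length_take, List.length_take] at h2
        exact h2
      have hjo : j < one.length := by omega
      have hjq' : j < (List.take 4 q).length := by rw [List.length_take]; omega
      have hjo' : j < (List.take 4 one).length := by rw [List.length_take]; omega
      have h := hget j hjq' hjo'
      simp only [List.get_eq_getElem, List.getElem_take] at h
      unfold posOK
      rw [List.getD_eq_getElem _ _ hjo, List.getD_eq_getElem _ _ hjq]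
      tauto
    · have hq : q.length ≤ j := by omega
      have hone : one.length ≤ j := by
        have h1 := hlen
        rw [List.length_take, List.length_take] at h1
        omega
      unfold posOK
      rw [List.getD_eq_default _ _ (by omega : one.length ≤ j), List.getD_eq_default _ _ (by omega : q.length ≤ j)]
      left; rfl

-- A's per-query loop is a countP
lemma countA_eq (info : List String) (q : List String) :
    info.foldl (fun cnt y =>
      let one := PySem.Str.split₀ y
      if PySem.List.pyGetD q (-1) "" < PySem.List.pyGetD one (-1) "" then
        if aCheck one q 0 then cnt + 1 else cnt
      else cnt) (0 : Int) =
    ((info.countP (fun y =>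
        decide (PySem.List.pyGetD q (-1) "" < PySem.List.pyGetD (PySem.Str.split₀ y) (-1) "" ∧
          aCheck (PySem.Str.split₀ y) q 0 = true))) : Int) := by
  have hbody : (fun (cnt : Int) y =>
      let one := PySem.Str.split₀ y
      if PySem.List.pyGetD q (-1) "" < PySem.List.pyGetD one (-1) "" then
        if aCheck one q 0 then cnt + 1 else cnt
      else cnt) =
      (fun (cnt : Int) y =>
        if (PySem.List.pyGetD q (-1) "" < PySem.List.pyGetD (PySem.Str.split₀ y) (-1) "" ∧
            aCheck (PySem.Str.split₀ y) q 0 = true) then cnt + 1 else cnt) := by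
    funext cnt y
    simp only []
    by_cases h1 : PySem.List.pyGetD q (-1) "" < PySem.List.pyGetD (PySem.Str.split₀ y) (-1) ""
    · by_cases h2 : aCheck (PySem.Str.split₀ y) q 0 = true
      · simp [h1, h2]
      · simp only [h2, Bool.false_eq_true, if_false, if_pos h1]
        rw [if_neg (by tauto)]
    · rw [if_neg h1, if_neg (by tauto)]
  rw [hbody, PySem.List.foldl_ite_add_one]
  simp

-- ===== VERDICT (by name: the statement is the Claim_ definition above) =====
theorem solution_spec : Claim_equal_solution := by
  intro info query _ hpre
  unfold Spec_solution
  by_cases hq : query = []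
  · subst hq
    simp [solution, solution_alt]
  · unfold solution solution_alt
    rw [if_neg hq]
    rw [PySem.List.foldl_append_singleton_eq_map]
    simp only [List.nil_append]
    apply List.map_congr_left
    intro x hx
    have hprex := hpre x hx
    rw [aStrip_eq]
    rw [countA_eq]
    -- B side
    have h4 : PySem.List.slice ((PySem.Str.split₀ x).filter (fun t => t ≠ "and")) none (some 4) =
        ((PySem.Str.split₀ x).filter (fun t => t ≠ "and")).take 4 := by
      rw [PySem.List.slice_to _ (by omega : (0:Int) ≤ 4)]
      rfl
    simp only [h4]
    rw [getD_bBuckets, List.countP_map, List.countP_filter]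
    have hpq : preQ x = (PySem.Str.split₀ x).filter (fun t => t ≠ "and") := rfl
    rw [← hpq]
    congr 1
    apply List.countP_congr
    intro y hy
    rcases hprex with hnil | ⟨hqne, hrow⟩
    · subst hnil; simp at hy
    · have hr := hrow y hy
      set one := PySem.Str.split₀ y
      set q := preQ x
      simp only [Function.comp_apply, Bool.and_eq_true, decide_eq_true_eq]
      exact and_congr_right fun hlt =>
        (aCheck_iff one q).trans (aCheck_mem_bKeys one q hr
          (by rw [pyGetD_neg_one, pyGetD_neg_one] at hlt
              exact String.lt_iff_toList_lt.mp hlt))
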